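-- pv_equiv track=rewrite | github.com/MikoMikocchi/chessie | src/chessie/core/notation.py | build_pgn
-- ===== SOURCE A (Python) =====
-- def pgn_movetext_from_sans(sans: list[str], result_token: str) -> str:
--     """Build PGN movetext from SAN moves and a result token."""
--     parts: list[str] = []
--     for ply, san in enumerate(sans):
--         if ply % 2 == 0:
--             parts.append(f"{(ply // 2) + 1}.")
--         parts.append(san)
--     parts.append(result_token)
--     return " ".join(parts)
--
-- def build_pgn(headers: dict[str, str], sans: list[str], result_token: str) -> str:
--     """Build a single-game PGN document."""
--     lines: list[str] = []
--     for key, value in headers.items():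
--         escaped = value.replace("\\", "\\\\").replace('"', '\\"')
--         lines.append(f'[{key} "{escaped}"]')
--     lines.append("")
--     lines.append(pgn_movetext_from_sans(sans, result_token))
--     lines.append("")
--     return "\n".join(lines)
-- ===== SOURCE B (Python) =====
-- def build_pgn(headers: dict[str, str], sans: list[str], result_token: str) -> str:
--     """Build a single-game PGN document (pairwise movetext assembly)."""
--     header_lines = [
--         '[{} "{}"]'.format(key, value.replace("\\", "\\\\").replace('"', '\\"'))
--         for key, value in headers.items()
--     ]
--     tokens: list[str] = []
--     for i in range(0, len(sans), 2):
--         tokens.append(f"{i // 2 + 1}.")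
--         tokens.extend(sans[i:i + 2])
--     tokens.append(result_token)
--     return "\n".join(header_lines + ["", " ".join(tokens), ""])
-- ===== Notes on version B (the rewrite author's own statement) =====
-- stated objective: alternative
-- what changed: The movetext is built by iterating over full moves (a step-2 range with a two-element slice per move pair) instead of A's per-ply loop with a parity branch; headers are built with a comprehension instead of an accumulator loop.
import Mathlib
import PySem

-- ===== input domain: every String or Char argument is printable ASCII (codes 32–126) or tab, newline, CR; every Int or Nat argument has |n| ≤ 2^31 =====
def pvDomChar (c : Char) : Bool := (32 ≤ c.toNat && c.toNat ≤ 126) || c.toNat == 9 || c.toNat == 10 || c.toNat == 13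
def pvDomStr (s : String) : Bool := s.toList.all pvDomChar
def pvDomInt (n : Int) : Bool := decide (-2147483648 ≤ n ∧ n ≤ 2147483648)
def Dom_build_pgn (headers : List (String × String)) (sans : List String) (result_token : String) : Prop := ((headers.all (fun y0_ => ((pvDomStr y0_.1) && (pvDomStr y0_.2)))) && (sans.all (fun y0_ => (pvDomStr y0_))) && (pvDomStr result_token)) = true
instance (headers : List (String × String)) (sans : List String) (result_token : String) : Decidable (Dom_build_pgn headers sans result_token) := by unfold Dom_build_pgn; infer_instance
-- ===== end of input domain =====

-- B builds the movetext by iterating over full moves (pairs of plies) with a step-2 range and slices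
-- instead of A's per-ply parity branch; objective: alternative decomposition (same cost).


-- ===== PORT A =====
def pgn_movetext_from_sans (sans : List String) (result_token : String) : String :=
  let parts : List String :=
    (PySem.List.enumerate sans).foldl
      (fun parts p =>
        let parts :=
          if PySem.Int.mod p.1 2 == 0 then
            parts ++ [PySem.Int.toStr (PySem.Int.floordiv p.1 2 + 1) ++ "."]
          else parts
        parts ++ [p.2]) []
  let parts := parts ++ [result_token]
  PySem.Str.join " " parts

def build_pgn (headers : List (String × String)) (sans : List String) (result_token : String) : String :=
  let lines : List String :=
    (PySem.Dict.ofList headers).items.foldl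
      (fun lines kv =>
        let escaped := PySem.Str.replace (PySem.Str.replace kv.2 "\\" "\\\\") "\"" "\\\""
        lines ++ ["[" ++ kv.1 ++ " \"" ++ escaped ++ "\"]"]) []
  let lines := lines ++ [""]
  let lines := lines ++ [pgn_movetext_from_sans sans result_token]
  let lines := lines ++ [""]
  PySem.Str.join "\n" lines

-- ===== PORT B =====
def build_pgn_alt (headers : List (String × String)) (sans : List String) (result_token : String) : String :=
  let header_lines : List String :=
    (PySem.Dict.ofList headers).items.map
      (fun kv =>
        "[" ++ kv.1 ++ " \"" ++ PySem.Str.replace (PySem.Str.replace kv.2 "\\" "\\\\") "\"" "\\\"" ++ "\"]")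
  let tokens : List String :=
    (PySem.List.pyRange 0 ((sans.length : Nat) : Int) 2).foldl
      (fun tokens i =>
        let tokens := tokens ++ [PySem.Int.toStr (PySem.Int.floordiv i 2 + 1) ++ "."]
        tokens ++ PySem.List.slice sans (some i) (some (i + 2))) []
  let tokens := tokens ++ [result_token]
  PySem.Str.join "\n" (header_lines ++ ["", PySem.Str.join " " tokens, ""])

-- ===== PRECONDITION & SPEC =====
def Spec_build_pgn (headers : List (String × String)) (sans : List String) (result_token : String) (out : String) : Prop := out = build_pgn_alt headers sans result_token
instance (headers : List (String × String)) (sans : List String) (result_token : String) (out : String) : Decidable (Spec_build_pgn headers sans result_token out) := by unfold Spec_build_pgn; infer_instance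

-- ===== CLAIM (what is proved, stated in full; the proofs are below) =====
def Claim_equal_build_pgn : Prop := ∀ (headers : List (String × String)) (sans : List String) (result_token : String), Dom_build_pgn headers sans result_token → Spec_build_pgn headers sans result_token (build_pgn headers sans result_token)

-- ===== LEMMAS AND PROOFS =====

/-- Move-number token for the (even) ply index `i`. -/
def pvNum (i : Int) : String := PySem.Int.toStr (PySem.Int.floordiv i 2 + 1) ++ "."

/-- The movetext tokens, two plies at a time; `i` is the even ply index of the pair. -/
def pvChunks : Int → List String → List String
  | _, [] => []
  | i, [a] => [pvNum i, a]
  | i, a :: b :: t => pvNum i :: a :: b :: pvChunks (i + 2) t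

theorem pv_mod_even (m : Nat) : PySem.Int.mod (2 * (m : Int)) 2 = 0 := by
  simp [PySem.Int.mod, Int.mul_fmod_right]

theorem pv_mod_odd (m : Nat) : PySem.Int.mod (2 * (m : Int) + 1) 2 = 1 := by
  simp only [PySem.Int.mod]
  rw [add_comm, Int.add_mul_fmod_self_left]
  decide

theorem pv_partsA_eq : ∀ (l : List String) (m : Nat),
    (PySem.List.enumerate l (2 * (m : Int))).flatMap
      (fun p => (if PySem.Int.mod p.1 2 == 0 then [pvNum p.1] else []) ++ [p.2])
    = pvChunks (2 * (m : Int)) l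
  | [], m => by simp [PySem.List.enumerate_nil, pvChunks]
  | [a], m => by
    simp [PySem.List.enumerate_cons, PySem.List.enumerate_nil, pvChunks]
  | a :: b :: t, m => by
    have ih := pv_partsA_eq t (m + 1)
    rw [PySem.List.enumerate_cons, PySem.List.enumerate_cons]
    have h2 : (2 * (m : Int) + 1) + 1 = 2 * ((m + 1 : Nat) : Int) := by push_cast; ring
    rw [h2]
    simp only [List.flatMap_cons, pv_mod_even m, pv_mod_odd m]
    rw [ih]
    simp only [pvChunks]
    have h3 : 2 * ((m + 1 : Nat) : Int) = 2 * (m : Int) + 2 := by push_cast; ring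
    rw [h3]
    simp

theorem pv_pyRange_two_nil (a b : Int) (h : b ≤ a) : PySem.List.pyRange a b 2 = [] := by
  rw [PySem.List.pyRange_of_pos a b (by norm_num)]
  rw [if_neg (by omega)]
  simp

theorem pv_pyRange_two_cons (a b : Int) (h : a < b) :
    PySem.List.pyRange a b 2 = a :: PySem.List.pyRange (a + 2) b 2 := by
  rw [PySem.List.pyRange_of_pos a b (by norm_num),
      PySem.List.pyRange_of_pos (a + 2) b (by norm_num)]
  rw [if_pos h]
  by_cases h2 : a + 2 < b
  · rw [if_pos h2]
    have hc : ((b - a + 2 - 1) / 2).toNat = ((b - (a + 2) + 2 - 1) / 2).toNat + 1 := by omega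
    rw [hc, List.range_succ_eq_map]
    refine List.cons_eq_cons.mpr ⟨by simp, ?_⟩
    simp only [List.map_map]
    apply List.map_congr_left
    intro k _
    simp only [Function.comp]
    push_cast
    ring
  · rw [if_neg h2]
    have hc : ((b - a + 2 - 1) / 2).toNat = 1 := by omega
    rw [hc]
    simp

theorem pv_tokensB_eq : ∀ (t p : List String) (m : Nat), p.length = 2 * m →
    (PySem.List.pyRange (2 * (m : Int)) (((p ++ t).length : Nat) : Int) 2).flatMap
      (fun i => (PySem.Int.toStr (PySem.Int.floordiv i 2 + 1) ++ ".") ::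
        PySem.List.slice (p ++ t) (some i) (some (i + 2)))
    = pvChunks (2 * (m : Int)) t
  | [], p, m, hp => by
    rw [pv_pyRange_two_nil _ _ (by simp [hp])]
    simp [pvChunks]
  | [a], p, m, hp => by
    have hlen : (((p ++ [a]).length : Nat) : Int) = 2 * (m : Int) + 1 := by
      simp only [List.length_append, List.length_cons, List.length_nil, hp]; omega
    rw [hlen, pv_pyRange_two_cons _ _ (by omega), pv_pyRange_two_nil _ _ (by omega)]
    have hsl : PySem.List.slice (p ++ [a]) (some (2 * (m : Int))) (some (2 * (m : Int) + 2))
        = [a] := by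
      have h1 : (2 * (m : Int)) = ((2 * m : Nat) : Int) := by push_cast; ring
      have h2 : (2 * (m : Int) + 2) = ((2 * m : Nat) : Int) + ((2 : Nat) : Int) := by push_cast; ring
      rw [h2, h1, PySem.List.slice_natCast_add]
      rw [← hp, List.drop_left]
      simp
    simp [hsl, pvChunks, pvNum]
  | a :: b :: t, p, m, hp => by
    have ih := pv_tokensB_eq t (p ++ [a, b]) (m + 1)
      (by simp only [List.length_append, List.length_cons, List.length_nil, hp]; omega)
    have hstop : (((p ++ a :: b :: t).length : Nat) : Int)
        = (((p ++ [a, b] ++ t).length : Nat) : Int) := by simp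
    have hgt : 2 * (m : Int) < (((p ++ a :: b :: t).length : Nat) : Int) := by
      simp only [List.length_append, List.length_cons, hp]; omega
    rw [pv_pyRange_two_cons _ _ hgt]
    simp only [List.flatMap_cons]
    have hsl : PySem.List.slice (p ++ a :: b :: t) (some (2 * (m : Int))) (some (2 * (m : Int) + 2))
        = [a, b] := by
      have h1 : (2 * (m : Int)) = ((2 * m : Nat) : Int) := by push_cast; ring
      have h2 : (2 * (m : Int) + 2) = ((2 * m : Nat) : Int) + ((2 : Nat) : Int) := by push_cast; ring
      rw [h2, h1, PySem.List.slice_natCast_add]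
      rw [← hp, List.drop_left]
      simp
    have harg : (2 * (m : Int)) + 2 = 2 * ((m + 1 : Nat) : Int) := by push_cast; ring
    have hpp : p ++ a :: b :: t = (p ++ [a, b]) ++ t := by simp
    rw [hsl, harg, hpp, ih]
    simp [pvChunks, pvNum, harg]

-- ===== VERDICT (by name: the statement is the Claim_ definition above) =====
theorem build_pgn_spec : Claim_equal_build_pgn := by
  intro headers sans result_token _
  unfold Spec_build_pgn
  simp only [build_pgn, build_pgn_alt, pgn_movetext_from_sans]
  have hfunA : (fun (parts : List String) (p : Int × String) =>
      (if PySem.Int.mod p.1 2 == 0 then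
          parts ++ [PySem.Int.toStr (PySem.Int.floordiv p.1 2 + 1) ++ "."]
        else parts) ++ [p.2])
      = (fun (parts : List String) (p : Int × String) =>
      parts ++ ((if PySem.Int.mod p.1 2 == 0 then
          [PySem.Int.toStr (PySem.Int.floordiv p.1 2 + 1) ++ "."] else []) ++ [p.2])) := by
    funext parts p
    rcases PySem.Int.mod_two_eq p.1 with h | h <;> simp only [h] <;> simp
  have hfunB : (fun (tokens : List String) (i : Int) =>
      (tokens ++ [PySem.Int.toStr (PySem.Int.floordiv i 2 + 1) ++ "."]) ++
        PySem.List.slice sans (some i) (some (i + 2)))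
      = (fun (tokens : List String) (i : Int) =>
      tokens ++ ((PySem.Int.toStr (PySem.Int.floordiv i 2 + 1) ++ ".") ::
        PySem.List.slice sans (some i) (some (i + 2)))) := by
    funext tokens i
    simp
  rw [hfunA, hfunB, PySem.List.foldl_append_eq_flatMap, PySem.List.foldl_append_eq_flatMap,
    PySem.List.foldl_append_eq_flatMap]
  have hA := pv_partsA_eq sans 0
  have hB := pv_tokensB_eq sans [] 0 rfl
  simp only [Nat.cast_zero, mul_zero, List.nil_append] at hA hB
  simp only [pvNum] at hA hB
  simp only [List.nil_append]
  rw [hA, hB, ← List.map_eq_flatMap]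
  simp [List.append_assoc]
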